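-- pv_equiv track=rewrite | github.com/DaveCSW/dazuoye | test/analysis.py | count_if
-- ===== SOURCE A (Python) =====
-- def count_if(f):
--     countif = 0
--     countelif = 0
--     countelse = 0
--     for i in f:
--         if i == 'if':
--             countif += 1
--         if i == 'elif':
--             countelif += 1
--         if i == 'else:':
--             countelse += 1
--     return str(countif) + ' ' + str(countelif) + ' ' + str(countelse) + ' '
-- ===== SOURCE B (Python) =====
-- def count_if(f):
--     f = list(f)
--     return ' '.join(str(f.count(t)) for t in ('if', 'elif', 'else:')) + ' '
-- ===== Notes on version B (the rewrite author's own statement) =====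
-- stated objective: idiomatic
-- what changed: Replaces the single explicit loop with three per-element branches by three staged list.count passes over a materialized list, one per target token, joined into the result string.
import Mathlib
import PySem

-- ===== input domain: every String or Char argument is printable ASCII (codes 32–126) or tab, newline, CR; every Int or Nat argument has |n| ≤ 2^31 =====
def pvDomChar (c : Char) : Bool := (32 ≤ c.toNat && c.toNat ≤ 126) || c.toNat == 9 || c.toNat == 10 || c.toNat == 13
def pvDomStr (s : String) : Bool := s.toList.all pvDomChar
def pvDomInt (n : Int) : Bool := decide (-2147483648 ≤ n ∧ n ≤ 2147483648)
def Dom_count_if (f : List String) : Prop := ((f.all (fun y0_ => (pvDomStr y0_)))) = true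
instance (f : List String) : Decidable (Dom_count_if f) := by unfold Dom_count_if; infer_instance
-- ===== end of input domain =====

-- B replaces A's explicit counting loop by three staged list.count passes joined into the result; objective: idiomatic.


-- ===== PORT A =====
def count_if (f : List String) : String :=
  let s := f.foldl (fun (acc : Int × Int × Int) i =>
    let acc := if i == "if" then (acc.1 + 1, acc.2.1, acc.2.2) else acc
    let acc := if i == "elif" then (acc.1, acc.2.1 + 1, acc.2.2) else acc
    if i == "else:" then (acc.1, acc.2.1, acc.2.2 + 1) else acc) (0, 0, 0)
  PySem.Int.toStr s.1 ++ " " ++ PySem.Int.toStr s.2.1 ++ " " ++ PySem.Int.toStr s.2.2 ++ " "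

-- ===== PORT B =====
def count_if_alt (f : List String) : String :=
  PySem.Str.join " " (["if", "elif", "else:"].map (fun t => PySem.Int.toStr (PySem.List.count f t))) ++ " "

-- ===== PRECONDITION & SPEC =====
def Spec_count_if (f : List String) (out : String) : Prop := out = count_if_alt f
instance (f : List String) (out : String) : Decidable (Spec_count_if f out) := by unfold Spec_count_if; infer_instance

-- ===== CLAIM (what is proved, stated in full; the proofs are below) =====
def Claim_equal_count_if : Prop := ∀ (f : List String), Dom_count_if f → Spec_count_if f (count_if f)

-- ===== LEMMAS AND PROOFS =====

-- ===== VERDICT (by name: the statement is the Claim_ definition above) =====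
lemma count_if_foldA (l : List String) (a b c : Int) :
    l.foldl (fun (acc : Int × Int × Int) i =>
      let acc := if i == "if" then (acc.1 + 1, acc.2.1, acc.2.2) else acc
      let acc := if i == "elif" then (acc.1, acc.2.1 + 1, acc.2.2) else acc
      if i == "else:" then (acc.1, acc.2.1, acc.2.2 + 1) else acc) (a, b, c)
    = (a + l.count "if", b + l.count "elif", c + l.count "else:") := by
  induction l generalizing a b c with
  | nil => simp
  | cons x xs ih =>
    simp only [List.foldl_cons, List.count_cons, ih]
    by_cases h1 : x = "if" <;> by_cases h2 : x = "elif" <;> by_cases h3 : x = "else:" <;>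
      simp_all [Prod.ext_iff] <;> omega

lemma join3 (A B C : String) : PySem.Str.join " " [A, B, C] = A ++ " " ++ B ++ " " ++ C := by
  simp only [PySem.Str.join]
  apply String.toList_injective
  simp [String.toList_append, PySem.Chars.join_cons_cons, PySem.Chars.join_singleton]

theorem count_if_spec : Claim_equal_count_if := by
  intro f _
  show count_if f = count_if_alt f
  simp only [count_if, count_if_alt, count_if_foldA, List.map, join3, PySem.List.count_eq,
    zero_add]
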